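-- pv_equiv track=rewrite | github.com/imdeniil/yandex-mail-mcp | yandex_mail_mcp.py | _quote_folder_for_command
-- ===== SOURCE A (Python) =====
-- def _quote_folder_for_command(encoded: str) -> str:
--     """
--     Quote a UTF-7 encoded folder name for use as a raw IMAP command argument.
--
--     imaplib's high-level methods (select, copy, rename, ...) handle quoting
--     internally, but _simple_command passes tokens verbatim. Folder names
--     containing spaces or other non-atom characters must be quoted explicitly
--     so the server parses them as a single mailbox argument.
--     """
--     needs_quote = not encoded or any(
--         c in encoded for c in ' \t"\\()[]{}%*'
--     )
--     if not needs_quote: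
--         return encoded
--     escaped = encoded.replace("\\", "\\\\").replace('"', '\\"')
--     return f'"{escaped}"'
-- ===== SOURCE B (Python) =====
-- def _quote_folder_for_command(encoded: str) -> str:
--     """Single pass: escape each char while detecting whether quoting is needed."""
--     needs_quote = not encoded
--     buf = []
--     for c in encoded:
--         if c == "\\":
--             buf.append("\\\\")
--         elif c == '"':
--             buf.append('\\"')
--         else:
--             buf.append(c)
--         needs_quote = needs_quote or c in ' \t"\\()[]{}%*'
--     if not needs_quote:
--         return encoded
--     return '"' + "".join(buf) + '"'
-- ===== Notes on version B (the rewrite author's own statement) =====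
-- stated objective: alternative
-- what changed: Replaces A's repeated whole-string membership scans (one per special character) and two chained .replace passes with a single traversal of the string that simultaneously escapes each character and accumulates the needs-quote flag.
import Mathlib
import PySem

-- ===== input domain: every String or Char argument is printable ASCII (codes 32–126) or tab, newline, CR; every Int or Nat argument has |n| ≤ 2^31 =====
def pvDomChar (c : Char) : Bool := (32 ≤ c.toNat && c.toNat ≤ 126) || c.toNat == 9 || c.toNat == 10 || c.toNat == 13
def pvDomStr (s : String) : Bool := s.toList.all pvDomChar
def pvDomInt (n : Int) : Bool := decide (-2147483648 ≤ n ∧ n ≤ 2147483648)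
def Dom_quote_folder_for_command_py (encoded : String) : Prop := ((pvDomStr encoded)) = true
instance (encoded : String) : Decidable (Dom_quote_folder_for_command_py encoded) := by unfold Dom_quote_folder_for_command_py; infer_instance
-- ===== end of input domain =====

-- B merges A's per-special-character whole-string scans and two chained .replace passes
-- into one traversal escaping characters while accumulating the needs-quote flag (objective: alternative).

-- ===== PORT A =====
-- the special characters of A's string literal ' \t"\\()[]{}%*'
def pvSpecials : List Char := [' ', '\t', '"', '\\', '(', ')', '[', ']', '{', '}', '%', '*']

def quote_folder_for_command_py (encoded : String) : String :=
  let needs_quote := encoded.toList.isEmpty ||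
    pvSpecials.any (fun c => PySem.Chars.isIn [c] encoded.toList)
  if !needs_quote then encoded
  else
    let escaped := PySem.Chars.replace
        (PySem.Chars.replace encoded.toList ['\\'] ['\\', '\\']) ['"'] ['\\', '"']
    String.ofList ('"' :: (escaped ++ ['"']))

-- ===== PORT B =====
def pvEsc (c : Char) : List Char :=
  if c = '\\' then ['\\', '\\'] else if c = '"' then ['\\', '"'] else [c]

def quote_folder_for_command_py_alt (encoded : String) : String :=
  let l := encoded.toList
  let r := l.foldl (fun (st : List Char × Bool) c =>
      (st.1 ++ pvEsc c, st.2 || pvSpecials.contains c)) ([], l.isEmpty)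
  if !r.2 then encoded
  else String.ofList ('"' :: (r.1 ++ ['"']))

-- ===== PRECONDITION & SPEC =====
def Spec_quote_folder_for_command_py (encoded : String) (out : String) : Prop := out = quote_folder_for_command_py_alt encoded
instance (encoded : String) (out : String) : Decidable (Spec_quote_folder_for_command_py encoded out) := by unfold Spec_quote_folder_for_command_py; infer_instance

-- ===== CLAIM (what is proved, stated in full; the proofs are below) =====
def Claim_equal_quote_folder_for_command_py : Prop := ∀ (encoded : String), Dom_quote_folder_for_command_py encoded → Spec_quote_folder_for_command_py encoded (quote_folder_for_command_py encoded)

-- ===== LEMMAS AND PROOFS =====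

-- A's `any(c in encoded …)` flag equals B's fold-accumulated flag
theorem pv_foldl_or (p : Char → Bool) (l : List Char) (b : Bool) :
    l.foldl (fun f c => f || p c) b = (b || l.any p) := by
  induction l generalizing b with
  | nil => simp
  | cons x t ih => simp [List.foldl_cons, ih, Bool.or_assoc]

theorem pv_flag_eq (l : List Char) :
    (l.isEmpty || pvSpecials.any (fun c => PySem.Chars.isIn [c] l)) =
      (l.isEmpty || l.any (fun c => pvSpecials.contains c)) := by
  have h : ∀ c, PySem.Chars.isIn [c] l = l.contains c := by
    intro c
    rw [Bool.eq_iff_iff, PySem.Chars.isIn_iff_infix, List.singleton_infix_iff]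
    simp
  simp only [h]
  congr 1
  rw [Bool.eq_iff_iff]
  simp only [List.any_eq_true, List.contains_eq_mem, decide_eq_true_eq]
  exact ⟨fun ⟨c, h1, h2⟩ => ⟨c, h2, h1⟩, fun ⟨c, h1, h2⟩ => ⟨c, h2, h1⟩⟩

-- single-character replace is a flatMap
theorem pv_replace_go_single (a : Char) (new : List Char) :
    ∀ (fuel : Nat) (l acc : List Char), l.length ≤ fuel →
      PySem.Chars.replace.go [a] new fuel l acc =
        acc.reverse ++ l.flatMap (fun c => if c = a then new else [c]) := by
  intro fuel
  induction fuel with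
  | zero =>
    intro l acc h
    have : l = [] := List.eq_nil_of_length_eq_zero (Nat.le_zero.mp h)
    subst this; simp [PySem.Chars.replace.go]
  | succ n ih =>
    intro l acc h
    cases l with
    | nil => simp [PySem.Chars.replace.go]
    | cons c t =>
      simp only [PySem.Chars.replace.go]
      by_cases hc : c = a
      · subst hc
        rw [if_pos (by simp [List.isPrefixOf])]
        rw [show List.drop ([c] : List Char).length (c :: t) = t from rfl]
        rw [ih t (new.reverse ++ acc) (by simpa using Nat.le_of_succ_le_succ h)]
        simp [List.flatMap_cons]
      · rw [if_neg (by simp [List.isPrefixOf, Ne.symm hc])]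
        rw [ih t (c :: acc) (by simpa using Nat.le_of_succ_le_succ h)]
        simp [List.flatMap_cons, hc]

theorem pv_replace_single (a : Char) (new l : List Char) :
    PySem.Chars.replace l [a] new = l.flatMap (fun c => if c = a then new else [c]) := by
  rw [PySem.Chars.replace]
  simp only [List.isEmpty_iff, reduceCtorEq, if_false]
  simpa using pv_replace_go_single a new l.length l [] le_rfl

-- A's two chained replaces build exactly B's per-character escape
theorem pv_escaped_eq (l : List Char) :
    PySem.Chars.replace (PySem.Chars.replace l ['\\'] ['\\', '\\']) ['"'] ['\\', '"'] =
      l.flatMap pvEsc := by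
  rw [pv_replace_single, pv_replace_single, List.flatMap_assoc]
  refine List.flatMap_congr (fun c _ => ?_)
  by_cases h1 : c = '\\'
  · subst h1; simp [pvEsc]
  · by_cases h2 : c = '"' <;> simp [pvEsc, h1, h2]

-- ===== VERDICT (by name: the statement is the Claim_ definition above) =====
theorem quote_folder_for_command_py_spec : Claim_equal_quote_folder_for_command_py := by
  intro encoded _
  unfold Spec_quote_folder_for_command_py
  simp only [quote_folder_for_command_py, quote_folder_for_command_py_alt]
  rw [PySem.List.foldl_prod_mk (fun (s : List Char) c => s ++ pvEsc c)
      (fun (s : Bool) c => s || pvSpecials.contains c),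
    PySem.List.foldl_append_eq_flatMap, pv_foldl_or, pv_flag_eq, pv_escaped_eq,
    List.nil_append]
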